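/-
  SEGMENT C4 OF `start_decoder` (0x1147c3–0x114820: loop 3786, the unordered `lengths` of a codebook; stb_vorbis_fixed.c 3786–3796)
  SPLIT AT THE RETURNS OF ITS THREE CALLS, and the CARRY LEMMAS of the codebook part of start_decoder.

      for (j = 0; j < c->entries; ++j) {                        0x1147c3  cut122 = the loop head (`AtC4`), `j ≥ entries` → 0x114594 (`AtC5`)
         int present = c->sparse ? get_bits(f,1) : 1;           0x1147f0  call get_bits(f,1), returns into cut123 = 0x1147f5
         if (present) {                                         0x1147f5  test eax,eax ; jne 114792
            lengths[j] = get_bits(f, 5) + 1;                    0x11479c  call get_bits(f,5), returns into cut121 = 0x1147a1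
            ++total;                                            0x1147b3  the byte store, 0x1147b6 add ebp,1
            if (lengths[j] == 32) return error(f, …);           0x1147b9  cmp r13b,0x20 ; je 11480e ; 0x11481b call error → cut124 = 0x114820
         } else lengths[j] = NO_CODE;                           0x114807  mov byte [r13], 0xff
      }                                                         0x1147bf  add r12d,1 → cut122

      StartDecoder.C4.*           THE CARRY LEMMAS (generic: for EVERY segment of the codebook part that calls get_bits / error or stores
                                  into an array of the iteration): `obj_above`, `Agree` (+ `.eqOn`, `.objEq`), `cur_carry`, `frame_carry`,
                                  `book_carry`, `lengths_carry`; `Agree.of_sameExcept`, `.refl`, `.trans`, `.widen`; the pieces `obj_stack`, `cb_carry`,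
                                  `kept_carry`, `struct_same`, `lengths_where`; `entriesOf`, `measure` (the loop's measure);
                                  `mid_of_call` (`InC4Mid` at the return of a `get_bits` call, whole);
                                  `next_of_store` (`InC4Next` after the byte store, whole); `reader_pre` (get_bits' precondition),
                                  `lengths_site` (the check of `lengths[j]`), `bits_same`, `lengths_apart`, `sub_frames`
      StartDecoder.InC4Mid        the assertion at cut123 and cut121 (a `get_bits` call of round `j` returned)
      StartDecoder.InC4Next       the assertion back at the head cut122 after round `j`
      StartDecoder.InC4Err        the assertion at cut124 (`error` returned 0)
      StartDecoder.SegC4a         cut122 → AtC5 | InC4Mid … cut123 | InC4Mid … cut121     0x1147c3–0x1147f0 + 0x114792–0x11479c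
      StartDecoder.SegC4b         InC4Mid … cut123 → InC4Mid … cut121 | InC4Next          0x1147f5–0x11480c + 0x1147bf + 0x114792–0x11479c
      StartDecoder.SegC4c         InC4Mid … cut121 → InC4Next | InC4Err                   0x1147a1–0x1147bf + 0x11480e–0x11481b
      StartDecoder.SegC4d         InC4Err → AtERR                                         0x114820 (one jmp)
      StartDecoder.SegC4.of_parts SegC4a → SegC4b → SegC4c → SegC4d → SegC4   (the claim `SegC4` of Vorbis/Spec/StartDecoderA.lean is unchanged;
                                  `ReachVia.loop` with the measure `entries − j`, no machine step)

  WHAT IS LIVE ACROSS A CALL (c/vorbis_f.dis 114792 … 114820): only callee-saved registers and stack slots.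
      0x1147f5  reads eax (tested; BOTH values are handled by .C4b: nothing is asserted of rax), r12d (= j), rbx (= lengths), rbp (= total,
                0x1147b6), r14 (= c: the head's loads `[r14+4]`, `[r14+0x1b]`); `[rsp+0x18]` = f (`Cur.slot_f`: the argument of the next call).
      0x1147a1  reads eax (`lea r13d,[rax+1]`: the byte stored; `< 32` from get_bits(f,5)'s post `GetBitsResult 5 rax`, so the byte is in
                [1, 32] and `== 32` is the error test), r12d, rbx, ebp, r14; `[rsp+0x18]` (the error call).
      0x114820  reads nothing (`jmp 113b22`); `AtERR` wants `Frame`, `Hand`, `eax = 0 ∧ Failed` (rbx, rbp, r12 – r15 arbitrary).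
-/
import Vorbis.Spec.StartDecoderA
import Vorbis.Spec.Reader
import Vorbis.ArenaShadow
namespace Vorbis.Spec.StartDecoder
open X86 X86.User Asan

set_option maxRecDepth 4000
set_option maxHeartbeats 4000000

namespace C4

/-! ### Where `*f` is -/

/-- Where `*f` is at start_decoder time: above start_decoder's own frame (it is a stack object of a CALLER's protected frame,
`Frame.callers`), or off the stack region (an object of `A.2`, `ShadowInv.off`). `LiveIn.where_` with `Frame.shadow` only gives
`R ≤ f`, which does not separate `*f` from the spill slots `[R, R + 5D0H)`.
WHEN: any goal that needs a field of `*f` apart from the function's own stack `[RA − 1888, RA + 8)` (a slot read after a callee wrote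
`*f`; `*f` read after a push). HOW: `have hab := C4.obj_above hfr hcur.hand`, then `hfr.r_eq`, `hfr.ra` (with `simp only [steady, depth]`)
and `omega`. `cur_carry` / `frame_carry` use it inside: a caller of those two does not need it. -/
theorem obj_above {u₀ : State} {g : Ghost} {pc : Word} {A : Arena × List Obj} {v : State} (hfr : Frame u₀ g pc A v)
    (hh : g.Hand A) : g.RA + 8 ≤ g.f ∨ g.f + 1808 ≤ 0x700000 ∨ 0x800000 ≤ g.f := by
  obtain ⟨o, ho, h1, h2⟩ := hh.obj
  simp only [Off.sizeof.stb_vorbis] at h2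
  rcases List.mem_append.mp ho with hs | hoth
  · left
    unfold stackObjs at hs
    obtain ⟨bF, hbF, hin⟩ := List.mem_flatMap.mp hs
    have hbF' : bF ∈ g.frames' := List.mem_cons_of_mem _ hbF
    obtain ⟨k1, k2, _, _, _⟩ := hfr.shadow.stack.active bF hbF'
    have hg := FrameLayout.objsAt_gran k1 k2 hin
    have hc := hfr.callers bF hbF
    have e1 : o.gLo = o.base / 8 := rfl
    omega
  · right
    have := hfr.shadow.off o hoth
    unfold OffStack at this
    omega

/-! ### The memory changes of the segment, and CUR(i) over them -/


/-- `mem'` agrees with `mem` off: the 408 bytes of stack below the steady rsp `R` (the callees' frames and return addresses), the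
bit reader's windows of `*f` (the footprint of get_bits; error's `[f + 140, f + 144)` lies inside), the `lengths` array
`[p, p + n)`. The ONE description of every memory change inside a segment of the codebook part.
WHEN: after a `get_bits` / `error` call returned (`n = 0`, `p = A.1.B`: no array window), after a checked byte store into an array of
the iteration (`p = lengths`, `n = E`), after a check call pushed its return address. HOW: state `hag : C4.Agree g.R g.f p n v.mem
w.mem` for the entry state `v` of the segment and the walker's state `w`: `intro a h0 h1 h2 h3 h4 h5 h6`, then the walker's `w_mem`
(writes below `R`) / the callee's `Mem.SameExcept` over `Reader.winsBits f` or `[f + 140, f + 144)` (`hs a (by …)`). Then `cur_carry`,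
`frame_carry`, `Agree.eqOn` (for `lengths_carry`) all take this ONE hypothesis. Callees may use `[R − 408, R)` only (1888 − 1480). -/
def Agree (R f p n : Nat) (mem mem' : Mem) : Prop :=
  ∀ a : Word, (a.toNat < R - 408 ∨ R ≤ a.toNat) →
    (a.toNat < f + 48 ∨ f + 56 ≤ a.toNat) → (a.toNat < f + 84 ∨ f + 96 ≤ a.toNat) →
    (a.toNat < f + 136 ∨ f + 144 ≤ a.toNat) → (a.toNat < f + 1484 ∨ f + 1749 ≤ a.toNat) →
    (a.toNat < f + 1752 ∨ f + 1784 ≤ a.toNat) → (a.toNat < p ∨ p + n ≤ a.toNat) → mem'.read a = mem.read a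

/-- Agreement on a range that misses the seven windows. WHEN: a `Mem.EqOn lo hi v.mem w.mem` is asked (a block `Kept`, a slot, the
`lengths` bytes for `lengths_carry`, `ZF.same`). HOW: `apply hag.eqOn` and seven `omega` goals (have `hfr.r_eq`, `hfr.ra`, `obj_above`,
the block's `ArenaOK.block_off` / `arena_inside` in the context). -/
theorem Agree.eqOn {R f p n : Nat} {mem mem' : Mem} (h : Agree R f p n mem mem') (lo hi : Nat)
    (h0 : hi ≤ R - 408 ∨ R ≤ lo) (h1 : hi ≤ f + 48 ∨ f + 56 ≤ lo) (h2 : hi ≤ f + 84 ∨ f + 96 ≤ lo)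
    (h3 : hi ≤ f + 136 ∨ f + 144 ≤ lo) (h4 : hi ≤ f + 1484 ∨ f + 1749 ≤ lo) (h5 : hi ≤ f + 1752 ∨ f + 1784 ≤ lo)
    (h6 : hi ≤ p ∨ p + n ≤ lo) : Mem.EqOn lo hi mem mem' := by
  intro a ha hb
  apply h
  · omega
  · omega
  · omega
  · omega
  · omega
  · omega
  · omega

/-- The windows of `*f` that a group reads, when they miss the bit reader's windows: `ObjEq`. `hw` is closed by `decide`.
WHEN: a group of the invariant over `*f` has a `.transfer` lemma that takes `ObjEq ws mem f mem' f` (`HeaderOK.transfer`,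
`CB0.transfer`, `BookTrans.frame_old`; NOT `.frame`, which wants `ObjSame`: a reader's footprint never gives that). HOW:
`hag.objEq hst hLf (by omega) (by decide)` with `hst : f + 1808 ≤ R − 408 ∨ R ≤ f` from `obj_above`; a single field: `(hag.objEq …
(ws := [(lo, hi)]) (by decide)).u8 / .i32 / .ptr off ⟨(lo, hi), by decide, by decide, by decide⟩`. -/
theorem Agree.objEq {R f p n : Nat} {mem mem' : Mem} (h : Agree R f p n mem mem')
    (hst : f + 1808 ≤ R - 408 ∨ R ≤ f) (hp : p + n ≤ f ∨ f + 1808 ≤ p) (hf : f + 1808 ≤ 2 ^ 64) {ws : Wins}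
    (hw : ∀ w, w ∈ ws → (w.2 ≤ 48 ∨ 56 ≤ w.1) ∧ (w.2 ≤ 84 ∨ 96 ≤ w.1) ∧ (w.2 ≤ 136 ∨ 144 ≤ w.1) ∧
      (w.2 ≤ 1484 ∨ 1749 ≤ w.1) ∧ (w.2 ≤ 1752 ∨ 1784 ≤ w.1) ∧ w.2 ≤ 1808) : ObjEq ws mem f mem' f := by
  apply ObjEq.of_eqOn
  · intro w hmem
    have := hw w hmem
    omega
  · intro w hmem
    obtain ⟨a1, a2, a3, a4, a5, a6⟩ := hw w hmem
    apply h.eqOn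
    · omega
    · omega
    · omega
    · omega
    · omega
    · omega
    · omega

/-- **`Agree` from a footprint**: a `Mem.SameExcept ws` (the walker's `w_same` after `v_after_call`, or `by u_same` over a literal
list) whose every window lies inside one of `Agree`'s seven. WHEN: the first step at every exit / call return. HOW:
`C4.Agree.of_sameExcept hsame (by intro w hw; simp only [List.mem_cons, List.not_mem_nil, or_false] at hw; rcases hw with rfl | rfl | …
<;> omega)` with `hsame : Mem.SameExcept [⟨rsp₀ − 1888, rsp₀ − 1480⟩, …] v.mem w.mem`; `g.R = g.RA − 1480`, `g.RA = (g.e.reg .rsp).toNat`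
(`unfold Ghost.R Ghost.RA steady`). -/
theorem Agree.of_sameExcept {R f p n : Nat} {mem mem' : Mem} {ws : List Span} (h : Mem.SameExcept ws mem mem')
    (hw : ∀ w, w ∈ ws → (R - 408 ≤ w.lo ∧ w.hi ≤ R) ∨ (f + 48 ≤ w.lo ∧ w.hi ≤ f + 56) ∨ (f + 84 ≤ w.lo ∧ w.hi ≤ f + 96) ∨
      (f + 136 ≤ w.lo ∧ w.hi ≤ f + 144) ∨ (f + 1484 ≤ w.lo ∧ w.hi ≤ f + 1749) ∨ (f + 1752 ≤ w.lo ∧ w.hi ≤ f + 1784) ∨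
      (p ≤ w.lo ∧ w.hi ≤ p + n)) : Agree R f p n mem mem' := by
  intro a h0 h1 h2 h3 h4 h5 h6
  apply h a
  intro w hmem
  have := hw w hmem
  omega

/-- No change. WHEN: the base case (an exit reached without any store), or to start an `Agree.trans` chain. -/
theorem Agree.refl (R f p n : Nat) (mem : Mem) : Agree R f p n mem mem :=
  fun _ _ _ _ _ _ _ _ => rfl

/-- Two changes in a row (entry → the callee's entry → its return; … → after the byte store). WHEN: the walker gives `w_mem` relative
to the state after the last call, not to the segment's entry. HOW: `hag1.trans hag2`, both over the SAME window `[p, p + n)`. -/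
theorem Agree.trans {R f p n : Nat} {m1 m2 m3 : Mem} (h12 : Agree R f p n m1 m2) (h23 : Agree R f p n m2 m3) :
    Agree R f p n m1 m3 :=
  fun a h0 h1 h2 h3 h4 h5 h6 => (h23 a h0 h1 h2 h3 h4 h5 h6).trans (h12 a h0 h1 h2 h3 h4 h5 h6)

/-- A larger array window. WHEN: an `Agree … A.1.B 0` (a call, no store) must be chained with an `Agree … lengths E` (the byte
store): widen the first. HOW: `hag.widen (by omega)` — the hypothesis says the old window lies inside the new one (an EMPTY old
window, `n = 0`: `Or.inl rfl`). -/
theorem Agree.widen {R f p n q m : Nat} {mem mem' : Mem} (h : Agree R f p n mem mem') (hin : n = 0 ∨ (q ≤ p ∧ p + n ≤ q + m)) :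
    Agree R f q m mem mem' := by
  intro a h0 h1 h2 h3 h4 h5 h6
  apply h a h0 h1 h2 h3 h4 h5
  omega

/-- **CUR(i) OVER ANY MEMORY CHANGE OF THE SEGMENT** (a `get_bits` / `error` call, a pushed return address, a byte stored into
`lengths`): `Cur` at `v` gives `Cur` at `w` when the memories `Agree`, `Bits f` holds again (the callee's post), r14 is kept, and
the `lengths` array `[p, p + n)` lies off the stack, off `*f`, and off every block of the head-of-iteration snapshot `Ai`.
WHEN: every cut point / exit of a segment C2 … C16 whose assertion has a `cur : Cur …` and whose memory differs from the entry's.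
HOW: `C4.cur_carry hfr hat.cur hag hbits hr14 hLs hLt hLf hLa`: `hfr` the entry's `Frame`, `hag` the ONE `Agree` of the walk so far,
`hbits := w_post.bits.bits` after a `get_bits` call (after `error` or a store: `Bits.frame`-style from the old `hat.cur.sd.bits` is NOT
needed when no reader ran: give the old `Bits` transported by the reader's own lemma, or call `cur_carry` only after the next reader),
`hr14 := w_kept .r14 rfl`; with `n = 0`, `p = A.1.B` the four `hL…` premises are `ArenaOK.bounds` / `Hand.objOut` arithmetic and
`fun B hB => …` from `arena_inside`. `Failed` for an error exit: `(C4.cur_carry …).failed`. -/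
theorem cur_carry {u₀ : State} {g : Ghost} {pc : Word} {i : Nat} {A2 A3 Ai : Arena} {A : Arena × List Obj} {p n : Nat}
    {v w : State} (hfr : Frame u₀ g pc A v) (h : Cur g i A2 A3 Ai A v)
    (hag : Agree g.R g.f p n v.mem w.mem) (hbits : Bits (g.Blk A) g.len w.mem g.f) (hr14 : w.reg .r14 = v.reg .r14)
    (hLs : p + n ≤ 0x700000 ∨ 0x800000 ≤ p) (hLt : p + n ≤ 0xC00000) (hLf : p + n ≤ g.f ∨ g.f + 1808 ≤ p)
    (hLa : ∀ B, Ai.Blk B → B.base + B.size ≤ p ∨ p + n ≤ B.base) : Cur g i A2 A3 Ai A w := by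
  have hab := obj_above hfr h.hand
  obtain ⟨hr1, hr2⟩ := hfr.r_eq
  obtain ⟨ha1, ha2, ha3⟩ := hfr.ra
  simp only [steady, depth] at hr1 ha2
  have hobr := h.sd.bits.OBR
  simp only [voff] at hobr
  obtain ⟨ho1, ho2⟩ := hobr
  have ha := h.sd.arena
  have hout := h.hand.objOut
  simp only [voff] at hout
  -- `*f` against the stack window
  have hst : g.f + 1808 ≤ g.R - 408 ∨ g.R ≤ g.f := by omega
  have hoe : ∀ {ws : Wins}, (∀ w, w ∈ ws → (w.2 ≤ 48 ∨ 56 ≤ w.1) ∧ (w.2 ≤ 84 ∨ 96 ≤ w.1) ∧ (w.2 ≤ 136 ∨ 144 ≤ w.1) ∧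
      (w.2 ≤ 1484 ∨ 1749 ≤ w.1) ∧ (w.2 ≤ 1752 ∨ 1784 ≤ w.1) ∧ w.2 ≤ 1808) → ObjEq ws v.mem g.f w.mem g.f :=
    fun hw => hag.objEq hst hLf (by omega) hw
  -- the blocks of the snapshot `Ai` are kept
  have hkept : AllKept Ai.Blk v.mem w.mem := by
    intro B hB
    have hBA : A.1.Blk B := hB.mono h.ages.exti
    have hoff := ha.block_off hBA
    have hin := arena_inside ha hBA
    have hb := ha.bounds
    have hl := hLa B hB
    refine ⟨?_, ha.blkOK.no_wrap hBA⟩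
    simp only [vblock]
    apply hag.eqOn
    · omega
    · omega
    · omega
    · omega
    · omega
    · omega
    · omega
  have hwb : ObjEq BookTrans.wins v.mem g.f w.mem g.f := hoe (by decide)
  have ecnt : stb_vorbis.codebook_count w.mem g.f = stb_vorbis.codebook_count v.mem g.f := by
    simp only [stb_vorbis.codebook_count, voff]
    exact hwb.i32 160 ⟨(160, 176), by decide, by decide, by decide⟩
  have ecbs : stb_vorbis.codebooks w.mem g.f = stb_vorbis.codebooks v.mem g.f := by
    simp only [stb_vorbis.codebooks, voff]
    exact hwb.ptr 168 ⟨(160, 176), by decide, by decide, by decide⟩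
  have ecb : g.cb w.mem i = g.cb v.mem i := by
    unfold Ghost.cb stb_vorbis.codebooks_at
    rw [ecbs]
  refine
    { sd := ?_
      hand := h.hand
      ages := h.ages.frame_old hwb hkept
      zf := ?_
      lt := ?_
      slot_f := ?_
      slot_i := ?_
      r14 := ?_ }
  · -- SDw 3
    refine
      { env := ?_
        frame := ?_
        arena := ?_
        setups := h.sd.setups
        bits := hbits
        first := ?_
        discard0 := ?_
        header := ?_
        cb0 := ?_
        rest := ?_ }
    · apply h.sd.env.eqOn
      apply hag.eqOn
      · omega
      · omega
      · omega
      · omega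
      · omega
      · omega
      · omega
    · apply h.sd.frame.frame _ (by omega)
      apply hag.eqOn
      · omega
      · omega
      · omega
      · omega
      · omega
      · omega
      · omega
    · apply ha.frame (by simp only [voff]; omega)
      simp only [voff]
      apply hag.eqOn
      · omega
      · omega
      · omega
      · omega
      · omega
      · omega
      · omega
    · have e : stb_vorbis.first_decode w.mem g.f = stb_vorbis.first_decode v.mem g.f := by
        simp only [stb_vorbis.first_decode, voff]
        exact (hoe (ws := [(1749, 1750)]) (by decide)).u8 1749 ⟨(1749, 1750), by decide, by decide, by decide⟩
      rw [e]
      exact h.sd.first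
    · have e : stb_vorbis.discard_samples_deferred w.mem g.f = stb_vorbis.discard_samples_deferred v.mem g.f := by
        simp only [stb_vorbis.discard_samples_deferred, voff]
        exact (hoe (ws := [(1784, 1788)]) (by decide)).i32 1784 ⟨(1784, 1788), by decide, by decide, by decide⟩
      rw [e]
      exact h.sd.discard0
    · intro hk
      exact (h.sd.header hk).transfer (hoe (by decide))
    · intro hk
      obtain ⟨c1, c2⟩ := h.sd.cb0 hk
      refine ⟨c1.transfer (hoe (by decide)) (fun _ _ hb => hb), ?_⟩
      rw [ecbs]
      exact c2
    · have hrz := h.sd.rest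
      have er : restFrom 3 = 176 := by decide
      unfold RestZero ZeroRange at hrz ⊢
      rw [er] at hrz ⊢
      simp only [voff] at hrz ⊢
      intro o h1 h2
      have ea : (addr (g.f + o)).toNat = g.f + o := toNat_addr _ (by omega)
      rw [hag (addr (g.f + o)) (by omega) (by omega) (by omega) (by omega) (by omega) (by omega) (by omega)]
      exact hrz o h1 h2
  · -- ZF(i + 1)
    rw [ecbs, ecnt]
    have hcb := h.ages.cbOK
    have hF2 : Ai.Blk (codebooksBlock v.mem g.f) := hcb.F2
    have hBA : A.1.Blk (codebooksBlock v.mem g.f) := hF2.mono h.ages.exti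
    have hoff := ha.block_off hBA
    have hin := arena_inside ha hBA
    have hb := ha.bounds
    have hl := hLa _ hF2
    have hlt := h.lt
    have hF1 := hcb.F1
    simp only [vblock, Off.sizeof.Codebook] at hoff hin hl
    refine ZF.same h.zf ?_ (by omega) (by simp only [Off.sizeof.Codebook]; omega)
    simp only [Off.sizeof.Codebook]
    apply hag.eqOn
    · omega
    · omega
    · omega
    · omega
    · omega
    · omega
    · omega
  · rw [ecnt]
    exact h.lt
  · have e : w.mem.u64 (g.R + 0x18) = v.mem.u64 (g.R + 0x18) := by
      refine (hag.eqOn (g.R + 0x18) (g.R + 0x20) ?_ ?_ ?_ ?_ ?_ ?_ ?_).u64 _ (by omega) (by omega) (by omega)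
      · omega
      · omega
      · omega
      · omega
      · omega
      · omega
      · omega
    rw [e]
    exact h.slot_f
  · have e : w.mem.u32 (g.R + 0x30) = v.mem.u32 (g.R + 0x30) := by
      refine (hag.eqOn (g.R + 0x30) (g.R + 0x34) ?_ ?_ ?_ ?_ ?_ ?_ ?_).u32 _ (by omega) (by omega) (by omega)
      · omega
      · omega
      · omega
      · omega
      · omega
      · omega
      · omega
    rw [e]
    exact h.slot_i
  · rw [hr14, ecb]
    exact h.r14


/-- **`Frame` OVER ANY MEMORY CHANGE OF THE SEGMENT**: the common part at `v` gives the common part at `w` (another program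
counter, the same stack pointer) when the memories `Agree` and the `lengths` array `[p, p + n)` lies in the arena's buffer, off
the stack and off `*f` (`n = 0`: no store into `lengths`, a callee's footprint only).
WHEN: every cut point / exit of a segment of the codebook part (its assertion starts with `frame : Frame u₀ g pc' A w`). HOW:
`C4.frame_carry hfr hat.cur.hand hat.cur.sd.bits.OBR hat.cur.sd.arena hag w_rip hrsp habi hLs hLt hLf hLar hLg` — `hobr` may need
`simp only [voff]`; `hrsp : w.reg .rsp = v.reg .rsp` from the walker's `w_rsp` and `c_rsp`; `habi` by `Vorbis.abiInv_of` from
`w_flags` / `w_mxcsr` (a callee's post state: `v_inv`). With `n = 0`, `p = A.1.B`: `hLar := ⟨Nat.le_refl _, by omega⟩`. The walker must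
have kept `[R, R + 5D0H)` apart from its own pushes: they are below `R`. -/
theorem frame_carry {u₀ : State} {g : Ghost} {pc pc' : Word} {A : Arena × List Obj} {p n : Nat} {v w : State}
    (hfr : Frame u₀ g pc A v) (hh : g.Hand A) (hobr : 0x400000 ≤ g.f ∧ g.f + 1808 ≤ 0xC00000)
    (ha : ArenaOK A.1 A.2 v.mem g.f)
    (hag : Agree g.R g.f p n v.mem w.mem) (hrip : w.rip = pc') (hrsp : w.reg .rsp = v.reg .rsp) (hinv : abiInv w)
    (hLs : p + n ≤ 0x700000 ∨ 0x800000 ≤ p) (hLt : p + n ≤ 0xC00000) (hLf : p + n ≤ g.f ∨ g.f + 1808 ≤ p)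
    (hLar : A.1.B ≤ p ∧ p + n ≤ A.1.B + A.1.L)
    (hLg : p + n ≤ Vorbis.Globals.log2_4.beg ∨ Vorbis.Globals.log2_4.beg + 16 ≤ p) : Frame u₀ g pc' A w := by
  have hab := obj_above hfr hh
  obtain ⟨hr1, hr2⟩ := hfr.r_eq
  obtain ⟨ha1, ha2, ha3⟩ := hfr.ra
  simp only [steady, depth] at hr1 ha2
  obtain ⟨ho1, ho2⟩ := hobr
  have htx := hh.arenaText
  have hbd := ha.bounds
  simp only [Vorbis.Globals.log2_4] at hLg
  have slot : ∀ k, 8 ≤ k → k + 8 ≤ 0x5d0 → w.mem.u64 (g.R + k) = v.mem.u64 (g.R + k) := by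
    intro k hk1 hk2
    refine (hag.eqOn (g.R + k) (g.R + k + 8) ?_ ?_ ?_ ?_ ?_ ?_ ?_).u64 _ (by omega) (by omega) (by omega)
    · omega
    · omega
    · omega
    · omega
    · omega
    · omega
    · omega
  refine
    { entry := hfr.entry
      rip := hrip
      rsp := by rw [hrsp]; exact hfr.rsp
      shadowIdx := by rw [slot 8 (by omega) (by omega)]; exact hfr.shadowIdx
      saved_rbx := by rw [slot 0x598 (by omega) (by omega)]; exact hfr.saved_rbx
      saved_rbp := by rw [slot 0x5a0 (by omega) (by omega)]; exact hfr.saved_rbp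
      saved_r12 := by rw [slot 0x5a8 (by omega) (by omega)]; exact hfr.saved_r12
      saved_r13 := by rw [slot 0x5b0 (by omega) (by omega)]; exact hfr.saved_r13
      saved_r14 := by rw [slot 0x5b8 (by omega) (by omega)]; exact hfr.saved_r14
      saved_r15 := by rw [slot 0x5c0 (by omega) (by omega)]; exact hfr.saved_r15
      saved_ra := by rw [slot 0x5c8 (by omega) (by omega)]; exact hfr.saved_ra
      code := ?_
      inv := hinv
      shadow := ?_
      offText := hfr.offText
      ext := hfr.ext
      callers := hfr.callers
      sh7 := ?_
      same := ?_ }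
  · -- the text
    have hc : Mem.EqOn Vorbis.L.textLo Vorbis.L.textHi u₀.mem v.mem := hfr.code
    show Mem.EqOn Vorbis.L.textLo Vorbis.L.textHi u₀.mem w.mem
    refine hc.trans (hag.eqOn _ _ ?_ ?_ ?_ ?_ ?_ ?_ ?_)
    all_goals simp only [Vorbis.L.textLo, Vorbis.L.textHi] at htx ⊢
    all_goals omega
  · -- the shadow
    apply hfr.shadow.untouched
    apply hag.eqOn
    all_goals omega
  · -- SH7: the table `log2_4`
    intro k hk
    show w.mem.readLE (addr (Vorbis.Globals.log2_4.beg + k)) 1 = _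
    have ea : (addr (Vorbis.Globals.log2_4.beg + k)).toNat = Vorbis.Globals.log2_4.beg + k := toNat_addr _ (by simp only [Vorbis.Globals.log2_4]; omega)
    have e := (hag.eqOn 1181248 (1181248 + 16) (by omega) (by omega) (by omega) (by omega) (by omega) (by omega) (by omega)).readLE
      (addr (Vorbis.Globals.log2_4.beg + k)) 1 (by rw [ea]; simp only [Vorbis.Globals.log2_4]; omega)
      (by rw [ea]; simp only [Vorbis.Globals.log2_4]; omega) (by rw [ea]; simp only [Vorbis.Globals.log2_4]; omega)
    rw [e]
    exact hfr.sh7 k hk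
  · -- the function's footprint
    refine hfr.same.trans ?_
    intro a hda
    have eB := hfr.ext.B
    have eL := hfr.ext.L
    unfold footprint writes at hda
    simp only [List.mem_cons, forall_eq_or_imp, List.not_mem_nil, false_imp_iff, implies_true, and_true, Block.span,
      objBlock, voff, depth] at hda
    obtain ⟨d0, d1, d2, d3, d4, d5⟩ := hda
    unfold Ghost.f Ghost.RA at *
    apply hag a
    all_goals omega


/-- **The clauses of `InC4` about the struct `cb(i)`** (K1, "c fresh at {LT, LV, MU, CW, SC, SV, SE}", where `lengths` is) when
the struct reads the same (`Codebook.SameFields.of_kept` of the struct's `Kept`, which `cur_carry`'s `hkept` gives for the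
codebooks block).
WHEN: the exit assertion asks `k1`, `fresh`, `place` (InC3 … InC6, `InC4Mid`) in a memory where the 2120-byte struct `cb(i)` was not
written. HOW: `obtain ⟨k1', fresh', place'⟩ := C4.book_carry sf hat.k1 hat.fresh hat.place` with `sf : Codebook.SameFields v.mem w.mem c`
from `Codebook.SameFields.of_kept` (the struct lies in the codebooks block, `BookTrans.cbOK.F2`, a block of `Ai`: kept by `Agree`);
then rewrite `g.cb w.mem i = g.cb v.mem i` (`codebooks` is a field of `*f` off the reader's windows: as `ecb` in `cur_carry`'s proof). -/
theorem book_carry {P : Block → Prop} {A : Arena × List Obj} {mem mem' : Mem} {c lengths : Nat}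
    (sf : Codebook.SameFields mem mem' c) (k1 : Codebook.K1 mem c) (fresh : Fresh7 mem c)
    (place : LengthsAt P A mem c lengths) :
    Codebook.K1 mem' c ∧ Fresh7 mem' c ∧ LengthsAt P A mem' c lengths := by
  refine ⟨k1.frame sf, ?_, ?_⟩
  · exact
      { lookup_type := by rw [sf.lookup_type]; exact fresh.lookup_type
        lookup_values := by rw [sf.lookup_values]; exact fresh.lookup_values
        multiplicands := by rw [sf.multiplicands]; exact fresh.multiplicands
        sorted_codewords := by rw [sf.sorted_codewords]; exact fresh.sorted_codewords
        sorted_values := by rw [sf.sorted_values]; exact fresh.sorted_values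
        codewords := by rw [sf.codewords]; exact fresh.codewords
        sorted_entries := by rw [sf.sorted_entries]; exact fresh.sorted_entries }
  · exact
      { sparse_01 := by rw [sf.sparse]; exact place.sparse_01
        sparse_temp := by rw [sf.sparse, sf.entries]; exact place.sparse_temp
        sparse_null := by rw [sf.sparse, sf.codeword_lengths]; exact place.sparse_null
        dense_block := by rw [sf.sparse, sf.entries]; exact place.dense_block
        dense_eq := by rw [sf.sparse, sf.codeword_lengths]; exact place.dense_eq
        dense_temps := by rw [sf.sparse]; exact place.dense_temps }

/-- **`lengths[0 .. j)` and `total`** when the array reads the same (a callee's footprint): L(j) and the count of used entries.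
WHEN: `lenL` and `rbp = usedCount …` of `InC4` / `InC4Mid` in a new memory that did not write `lengths[0 .. j)` (a call; also the store
of `lengths[j]` itself: it is at `p + j`, outside `[p, p + j)` — then `LenL.store` / `usedCount_succ_used` / `_unused` add the new byte).
HOW: `obtain ⟨hl', hu'⟩ := C4.lengths_carry (hag.eqOn lengths (lengths + j) …) hb hat.lenL`, `rw [hu']` in the `rbp` clause. -/
theorem lengths_carry {mem mem' : Mem} {p j : Nat} (he : Mem.EqOn p (p + j) mem mem') (hb : p + j ≤ 2 ^ 64)
    (hl : LenL mem p j) : LenL mem' p j ∧ usedCount mem' p j = usedCount mem p j := by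
  refine ⟨hl.same he hb, ?_⟩
  unfold usedCount
  apply countBelow_congr
  intro k hk
  unfold usedP
  rw [he.u8 (p + k) (by omega) (by omega) hb]

/-! ### Pieces of the carry, by themselves -/

/-- **`*f` against the callees' stack window**, the premise `hst` of `Agree.objEq`. WHEN: before `hag.objEq`. HOW:
`C4.obj_stack hfr hcur.hand`. -/
theorem obj_stack {u₀ : State} {g : Ghost} {pc : Word} {A : Arena × List Obj} {v : State} (hfr : Frame u₀ g pc A v)
    (hh : g.Hand A) : g.f + 1808 ≤ g.R - 408 ∨ g.R ≤ g.f := by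
  have hab := obj_above hfr hh
  obtain ⟨hr1, hr2⟩ := hfr.r_eq
  obtain ⟨ha1, ha2, ha3⟩ := hfr.ra
  simp only [steady, depth] at hr1 ha2
  omega

/-- **The address of `cb(i)` reads the same** over any memory change of the segment (`codebooks` is a field of `*f` off the bit
reader's windows). WHEN: a clause over `g.cb w.mem i` is to be had from the one over `g.cb v.mem i`. HOW: `rw [C4.cb_carry hfr
hcur hag hLf]`. -/
theorem cb_carry {u₀ : State} {g : Ghost} {pc : Word} {i : Nat} {A2 A3 Ai : Arena} {A : Arena × List Obj} {p n : Nat}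
    {v w : State} (hfr : Frame u₀ g pc A v) (h : Cur g i A2 A3 Ai A v) (hag : Agree g.R g.f p n v.mem w.mem)
    (hLf : p + n ≤ g.f ∨ g.f + 1808 ≤ p) : g.cb w.mem i = g.cb v.mem i := by
  have hst := obj_stack hfr h.hand
  have hobr := h.sd.bits.OBR
  simp only [voff] at hobr
  obtain ⟨ho1, ho2⟩ := hobr
  have hwb : ObjEq BookTrans.wins v.mem g.f w.mem g.f := hag.objEq hst hLf (by omega) (by decide)
  have ecbs : stb_vorbis.codebooks w.mem g.f = stb_vorbis.codebooks v.mem g.f := by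
    simp only [stb_vorbis.codebooks, voff]
    exact hwb.ptr 168 ⟨(160, 176), by decide, by decide, by decide⟩
  unfold Ghost.cb stb_vorbis.codebooks_at
  rw [ecbs]

/-- **Every block of the head-of-iteration snapshot `Ai` is kept** over a memory change whose `lengths` window `[p, p + n)` misses
them. WHEN: a `.Kept` / `AllKept` premise (`BookTrans.frame_old`, `CodebooksOK.cb_kept`, `Codebook.SameFields.of_kept`). HOW:
`C4.kept_carry hfr hcur hag hLa`. -/
theorem kept_carry {u₀ : State} {g : Ghost} {pc : Word} {i : Nat} {A2 A3 Ai : Arena} {A : Arena × List Obj} {p n : Nat}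
    {v w : State} (hfr : Frame u₀ g pc A v) (h : Cur g i A2 A3 Ai A v) (hag : Agree g.R g.f p n v.mem w.mem)
    (hLa : ∀ B, Ai.Blk B → B.base + B.size ≤ p ∨ p + n ≤ B.base) : AllKept Ai.Blk v.mem w.mem := by
  obtain ⟨hr1, hr2⟩ := hfr.r_eq
  obtain ⟨ha1, ha2, ha3⟩ := hfr.ra
  simp only [steady, depth] at hr1 ha2
  have ha := h.sd.arena
  have hout := h.hand.objOut
  simp only [voff] at hout
  intro B hB
  have hBA : A.1.Blk B := hB.mono h.ages.exti
  have hoff := ha.block_off hBA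
  have hin := arena_inside ha hBA
  have hb := ha.bounds
  have hl := hLa B hB
  refine ⟨?_, ha.blkOK.no_wrap hBA⟩
  simp only [vblock]
  apply hag.eqOn
  · omega
  · omega
  · omega
  · omega
  · omega
  · omega
  · omega

/-- **The struct `cb(i)` reads the same** over a memory change that keeps the blocks of `Ai` (the struct lies in the codebooks
block). WHEN: the premise `sf` of `C4.book_carry`; `sf.entries` for `entriesOf`. HOW: `C4.struct_same hcur (C4.kept_carry …)`. -/
theorem struct_same {g : Ghost} {i : Nat} {A2 A3 Ai : Arena} {A : Arena × List Obj} {v : State} {mem' : Mem}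
    (h : Cur g i A2 A3 Ai A v) (hk : AllKept Ai.Blk v.mem mem') : Codebook.SameFields v.mem mem' (g.cb v.mem i) := by
  have hcb := h.ages.cbOK
  apply Codebook.SameFields.of_kept
  exact hcb.cb_kept (hk _ hcb.F2) i h.lt

/-- **Where the `lengths` array is, as arithmetic**: inside the arena's buffer, in the data space, off the stack region — from
`LengthsAt` (sparse: the temp block P1; dense: a setup block allocated since `Ai`). WHEN: the side premises of `Agree.eqOn` for
`[lengths, lengths + j)`, of `cur_carry` / `frame_carry` with the window `lengths E`, a check site of `lengths[j]`. HOW: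
`obtain ⟨h1, h2, h3, h4⟩ := C4.lengths_where hcur.sd.arena place`, then `omega` (with `HandOK.objOut` for `*f`). -/
theorem lengths_where {P : Block → Prop} {A : Arena × List Obj} {mem : Mem} {f c lengths : Nat} (ha : ArenaOK A.1 A.2 mem f)
    (hP : ∀ B, P B → A.1.Blk B) (place : LengthsAt P A mem c lengths) :
    A.1.B ≤ lengths ∧ lengths + (Codebook.entries mem c).toNat ≤ A.1.B + A.1.L ∧
    lengths + (Codebook.entries mem c).toNat ≤ 0xC00000 ∧
    (lengths + (Codebook.entries mem c).toNat ≤ 0x700000 ∨ 0x800000 ≤ lengths) := by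
  have hb := ha.bounds
  rcases place.sparse_01 with h0 | h1
  · have hB : A.1.Blk ⟨lengths, (Codebook.entries mem c).toNat⟩ := hP _ (place.dense_block h0)
    have hoff := ha.block_off hB
    have hin := arena_inside ha hB
    simp only at hoff hin
    omega
  · have hT : A.1.TBlock lengths (Codebook.entries mem c).toNat := (place.sparse_temp h1).tblock (List.mem_singleton.mpr rfl)
    have hoff := ha.tblock_off hT
    have hr := ha.tblock_range hT
    have hl := le_r8 (Codebook.entries mem c).toNat
    omega

/-! ### Call sites and check sites of the codebook part -/

/-- The objects of the callers' frames and of `A.2` are objects inside the function too (its own frame in front). (The lemma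
`sub_frames'` of Vorbis/Spec/StartDecoderATest.lean, here for the importers of this file.) -/
theorem sub_frames (g : Ghost) (A : Arena × List Obj) (o : Obj) (h : o ∈ stackObjs g.frames ++ A.2) :
    o ∈ stackObjs g.frames' ++ A.2 := by
  unfold Ghost.frames'
  rw [stackObjs_cons]
  rcases List.mem_append.mp h with hs | ho
  · exact List.mem_append_left _ (List.mem_append_right _ hs)
  · exact List.mem_append_right _ ho

/-- **The precondition of a packet reader (`get_bits`, `get8_packet` …) called from a cut point of the codebook part**: the state
`s` at the callee's entry (the return address pushed: `rsp + 8 = R`), `rdi = f`, no store since `v` went to the shadow or into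
`*f`. WHEN: the goal `pre_<addr>` of `call get_bits` (`refine ⟨C4.reader_pre hfr hat.cur hun hrsp hrdi heq, ?_⟩`, the second part is
`bitsArg s ≤ 32`: `rw [bitsArg_def, w_rsi]; decide`). HOW: `hun` by `v_untouched`; `hrsp` from `w_rsp` (`u_omega` after `unfold
Ghost.R Ghost.RA steady`); `hrdi` from `w_rdi` and `hat.cur.slot_f`; `heq` by `rw [w_mem]` and `Mem.eqOn_writeLE` / `u_eqon` (the
pushes are below `R`, `*f` is not: `C4.obj_stack`). -/
theorem reader_pre {u₀ : State} {g : Ghost} {pc : Word} {i : Nat} {A2 A3 Ai : Arena} {A : Arena × List Obj} {v s : State}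
    (hfr : Frame u₀ g pc A v) (hcur : Cur g i A2 A3 Ai A v) (hun : ShadowUntouched v.mem s.mem)
    (hrsp : (s.reg .rsp).toNat + 8 = g.R) (hrdi : s.reg .rdi = addr g.f)
    (heq : Mem.EqOn g.f (g.f + 1808) v.mem s.mem) : ReaderPre A.2 g.frames' (g.Blk A) g.len s := by
  have hobr := hcur.sd.bits.OBR
  simp only [voff] at hobr
  have e : (s.reg .rdi).toNat = g.f := by
    rw [hrdi]
    exact toNat_addr g.f (by omega)
  have hobj : (objBlock g.f).Same v.mem s.mem := heq
  refine ⟨⟨?_, hfr.offText⟩, ?_, ?_⟩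
  · rw [hrsp]
    exact hfr.shadow.untouched hun
  · rw [e]
    exact ⟨hcur.sd.env.live, hcur.hand.obj.mono (sub_frames g A), fun hp => (hcur.hand.inp hp).mono (sub_frames g A)⟩
  · rw [e]
    exact hcur.sd.bits.frame_fields (Bits.SameFields.of_same hobj)

/-- **The check site of `lengths[j]`** (`__asan_store1_noabort(lengths + j)`, 0x1147ae / 0x114802; the same for any byte of the
array): the byte lies in the temp block P1 (sparse) or in the setup block of `lengths` (dense), a live object of `A.2`. WHEN: the goal
`check_<addr> : AccSmall 1 s.mem b`. HOW: `C4.lengths_site hat.cur.sd.arena hfr.shadow hun (fun B hB => hB.1) hat.place hj hb` with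
`hun : ShadowUntouched v.mem s.mem` by `v_untouched`, `hj : j < entries`, `hb : b.toNat = lengths + j` (`cnt32_sext`, `toNat_addr`). -/
theorem lengths_site {P : Block → Prop} {A : Arena × List Obj} {frames : List (Nat × FrameLayout)} {top : Nat}
    {mem mem' : Mem} {f c lengths j : Nat} (ha : ArenaOK A.1 A.2 mem f) (hsh : ShadowInv A.2 frames top mem)
    (hun : ShadowUntouched mem mem') (hP : ∀ B, P B → A.1.Blk B) (place : LengthsAt P A mem c lengths)
    (hj : j < (Codebook.entries mem c).toNat) {b : Word} (hb : b.toNat = lengths + j) : AccSmall 1 mem' b := by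
  have hsh' := hsh.untouched hun
  refine ⟨hsh'.sealed, ?_⟩
  rw [hb]
  rcases place.sparse_01 with h0 | h1
  · have hB : A.1.Block lengths (Codebook.entries mem c).toNat := hP _ (place.dense_block h0)
    exact ha.block_acc_inv hsh' hB (Nat.le_add_right _ _) (by omega) (Nat.le_refl _)
  · have hT : A.1.TBlock lengths (Codebook.entries mem c).toNat := (place.sparse_temp h1).tblock (List.mem_singleton.mpr rfl)
    exact ha.tblock_acc_inv hsh' hT (Nat.le_add_right _ _) (by omega) (Nat.le_refl _)

/-! ### The measure of loop 3786 -/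

/-- The number of entries of the book under construction (`c->entries`, `c = cb(i)`) read off the state `v`: the constant `E` of the
child claims. WHEN: a child's exit `InC4Mid … E …` / `InC4Next … E …` asks `entriesOf g i w = E` for the NEW state `w`; HOW: `unfold
C4.entriesOf`, then the struct `cb(i)` reads the same (`Codebook.SameFields.entries` from `book_carry`'s premise, and `g.cb w.mem i =
g.cb v.mem i` as in `cur_carry`'s proof). -/
def entriesOf (g : Ghost) (i : Nat) (v : State) : Nat := (Codebook.entries v.mem (g.cb v.mem i)).toNat

/-- The measure of loop 3786: `entries − j`, read off the state (`r12 = j`). Used by `SegC4.of_parts` only. -/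
def measure (g : Ghost) (i : Nat) (v : State) : Nat := entriesOf g i v - (v.reg .r12).toNat

end C4

/-! ### The cut points inside segment C4, and their assertions

The segment has three calls of functions with a `Calls` contract; the walker stops after each. The three return addresses are
labelled cut points of Vorbis/Labels.lean: `cut123` (0x1147f5, after `get_bits(f, 1)`), `cut121` (0x1147a1, after
`get_bits(f, 5)`), `cut124` (0x114820, after `error`). The ghost arena, the snapshots and `lengths` do not change inside the
segment (nothing is allocated). -/

/-- **The assertion at `cut123` (0x1147f5) and `cut121` (0x1147a1)** (the state a `get_bits` call of round `j` returned): the loop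
invariant `InC4` at the program counter `pc`, with `j < entries` (the loop test 0x1147d0 passed) and the entries count named `E` (the
measure's constant). Live: r12 = j, rbp = total, rbx = lengths, r14 = c (`cur.r14`), `[R+18H]` = f (`cur.slot_f`) — callee-saved
registers and stack slots only. At `cut121` the result of `get_bits(f, 5)` is below 32 (`rax5`; `GetBitsResult 5` of the post); at
`cut123` NOTHING is asserted of rax (the bit just read: segment .C4b handles both values). -/
structure InC4Mid (u₀ : State) (g : Ghost) (i : Nat) (A2 A3 Ai : Arena) (A : Arena × List Obj) (lengths E j : Nat) (pc : Word)
    (v : State) : Prop where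
  /-- the common part, at the return address `pc` of the call -/
  frame : Frame u₀ g pc A v
  /-- CUR(i) in the memory after the call (`C4.cur_carry`) -/
  cur : Cur g i A2 A3 Ai A v
  /-- K1 of the book under construction (`C4.book_carry`) -/
  k1 : Codebook.K1 v.mem (g.cb v.mem i)
  /-- r12 = j (callee-saved; written at 0x1147bf only) -/
  r12 : v.reg .r12 = addr j
  /-- `c->entries = E` -/
  ent : C4.entriesOf g i v = E
  /-- the loop test passed: `j < c->entries` -/
  j_lt : j < E
  /-- total of line 3785: the used entries so far (rbp, callee-saved; written at 0x1147b6 only) -/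
  rbp : v.reg .rbp = addr (usedCount v.mem lengths j)
  /-- rbx = lengths (callee-saved; not written in the segment) -/
  rbx : v.reg .rbx = addr lengths
  /-- L(j) (`C4.lengths_carry`) -/
  lenL : LenL v.mem lengths j
  /-- where the `lengths` array is (`C4.book_carry`) -/
  place : LengthsAt (Since Ai A.1) A v.mem (g.cb v.mem i) lengths
  /-- c fresh at {LT, LV, MU, CW, SC, SV, SE} (`C4.book_carry`) -/
  fresh : Fresh7 v.mem (g.cb v.mem i)
  /-- the result of `get_bits(f, 5)`; at `cut123` this clause says nothing (`pc = cut121 → …`) -/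
  rax5 : pc = Vorbis.L.start_decoder.cut121 → (v.reg .rax).toNat < 32

/-- **The assertion back at the loop head `cut122`** after round `j`: `InC4` for `j + 1`, the entries count unchanged (so the
measure `entries − j` went down). -/
def InC4Next (u₀ : State) (g : Ghost) (i : Nat) (A2 A3 Ai : Arena) (A : Arena × List Obj) (lengths E j : Nat) (v : State) : Prop :=
  InC4 u₀ g i A2 A3 Ai A lengths (j + 1) v ∧ C4.entriesOf g i v = E

/-- **The assertion at `cut124` (0x114820)** (after `error(f, VORBIS_invalid_setup)` returned 0): SD.ERR, one `jmp` before the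
epilogue. `Failed` is `Cur.failed` of the `Cur` that `C4.cur_carry` gives over error's footprint `[f + 140, f + 144)`. -/
structure InC4Err (u₀ : State) (g : Ghost) (A : Arena × List Obj) (v : State) : Prop where
  /-- the common part, at the return address of `call error` -/
  frame : Frame u₀ g Vorbis.L.start_decoder.cut124 A v
  /-- `*f`, the input, the output, the globals as live objects (`Cur.hand`; memory-independent) -/
  hand : g.Hand A
  /-- eax = 0 (`error`'s post: rax = 0) -/
  rax0 : (v.reg .rax).toNat % 2 ^ 32 = 0
  /-- SD.ERR -/
  failed : Failed g.len g.f (g.Live A) A v.mem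

/-! ### `InC4Mid` over a `get_bits` call -/

namespace C4

/-- **`InC4Mid` AT THE RETURN OF A `get_bits` CALL** (the exits `cut123` / `cut121` of C4a, `cut121` of C4b): from the clauses of
`InC4` / `InC4Mid` at the segment's entry state `v`, the ONE `Agree` with the empty window at the arena's base (callee frames below
`R`, the bit reader's windows of `*f`), `Bits` of the callee's post, and the walker's register facts. WHEN: after `v_returned` /
`v_after_call` of `call get_bits`, with `w` the returned state. HOW: `hag` by `C4.Agree.of_sameExcept` from the walker's
`Mem.SameExcept` over the entry state (`u_same`); `hbits := w_post.bits.bits`; `h12`, `hbp`, `hbx`, `h14` from `w_kept` (callee-saved) and the entry assertion;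
`hrax` from `w_post.bits.result` at `cut121`, `fun e => absurd e (by decide)` at `cut123`. -/
theorem mid_of_call {u₀ : State} {g : Ghost} {pc pc' : Word} {i : Nat} {A2 A3 Ai : Arena} {A : Arena × List Obj}
    {lengths j : Nat} {v w : State} (hfr : Frame u₀ g pc A v) (hcur : Cur g i A2 A3 Ai A v)
    (k1 : Codebook.K1 v.mem (g.cb v.mem i)) (lenL : LenL v.mem lengths j)
    (place : LengthsAt (Since Ai A.1) A v.mem (g.cb v.mem i) lengths) (fresh : Fresh7 v.mem (g.cb v.mem i))
    (hj : j < entriesOf g i v)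
    (hag : Agree g.R g.f A.1.B 0 v.mem w.mem) (hbits : Bits (g.Blk A) g.len w.mem g.f)
    (hrip : w.rip = pc') (hrsp : w.reg .rsp = v.reg .rsp) (hinv : abiInv w)
    (h12 : w.reg .r12 = addr j) (hbp : w.reg .rbp = addr (usedCount v.mem lengths j)) (hbx : w.reg .rbx = addr lengths)
    (h14 : w.reg .r14 = v.reg .r14)
    (hrax : pc' = Vorbis.L.start_decoder.cut121 → (w.reg .rax).toNat < 32) :
    InC4Mid u₀ g i A2 A3 Ai A lengths (entriesOf g i v) j pc' w := by
  have ha := hcur.sd.arena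
  have hb := ha.bounds
  have h1x := ha.AR1x
  have hout := hcur.hand.objOut
  simp only [voff] at hout
  have hobr := hcur.sd.bits.OBR
  simp only [voff] at hobr
  have hglob := hcur.hand.outside ⟨0x120640, 16⟩ (by
    unfold fixedBlocks globalBlocks
    apply List.mem_cons_of_mem
    apply List.mem_cons_of_mem
    apply List.mem_cons_of_mem
    apply List.mem_cons_of_mem
    exact List.mem_cons_self)
  simp only at hglob
  obtain ⟨hr1, hr2⟩ := hfr.r_eq
  obtain ⟨ha1, ha2, ha3⟩ := hfr.ra
  simp only [steady, depth] at hr1 ha2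
  -- the window `[A.1.B, A.1.B + 0)`
  have hLs : A.1.B + 0 ≤ 0x700000 ∨ 0x800000 ≤ A.1.B := by omega
  have hLt : A.1.B + 0 ≤ 0xC00000 := by omega
  have hLf : A.1.B + 0 ≤ g.f ∨ g.f + 1808 ≤ A.1.B := by omega
  have hLa : ∀ B, Ai.Blk B → B.base + B.size ≤ A.1.B ∨ A.1.B + 0 ≤ B.base := by
    intro B hB
    have hin := arena_inside ha (hB.mono hcur.ages.exti)
    omega
  have hLg : A.1.B + 0 ≤ Vorbis.Globals.log2_4.beg ∨ Vorbis.Globals.log2_4.beg + 16 ≤ A.1.B := by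
    simp only [Vorbis.Globals.log2_4]
    omega
  have hfr' : Frame u₀ g pc' A w :=
    frame_carry hfr hcur.hand hobr ha hag hrip hrsp hinv hLs hLt hLf ⟨Nat.le_refl _, by omega⟩ hLg
  have hcur' : Cur g i A2 A3 Ai A w := cur_carry hfr hcur hag hbits h14 hLs hLt hLf hLa
  have ecb : g.cb w.mem i = g.cb v.mem i := cb_carry hfr hcur hag hLf
  have sf : Codebook.SameFields v.mem w.mem (g.cb v.mem i) := struct_same hcur (kept_carry hfr hcur hag hLa)
  obtain ⟨k1', fresh', place'⟩ := book_carry sf k1 fresh place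
  -- the `lengths` array
  obtain ⟨w1, w2, w3, w4⟩ := lengths_where ha (fun B hB => hB.1) place
  have hjE : j < (Codebook.entries v.mem (g.cb v.mem i)).toNat := hj
  have heq : Mem.EqOn lengths (lengths + j) v.mem w.mem := by
    apply hag.eqOn
    · omega
    · omega
    · omega
    · omega
    · omega
    · omega
    · omega
  obtain ⟨lenL', hu'⟩ := lengths_carry heq (by omega) lenL
  have eent : entriesOf g i w = entriesOf g i v := by
    unfold entriesOf
    rw [ecb, sf.entries]
  exact
    { frame := hfr'
      cur := hcur'
      k1 := by rw [ecb]; exact k1'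
      r12 := h12
      ent := eent
      j_lt := hj
      rbp := by rw [hu']; exact hbp
      rbx := hbx
      lenL := lenL'
      place := by rw [ecb]; exact place'
      fresh := by rw [ecb]; exact fresh'
      rax5 := hrax }

/-- **`Bits` when `*f` reads the same** (a push, a byte stored into `lengths`: no reader ran). WHEN: the premise `hbits` of
`cur_carry` / `next_of_store` on a path without a reader call. HOW: `C4.bits_same hat.cur heq`, `heq` by `rw [w_mem]` + `u_eqon` /
`Mem.eqOn_writeLE` (the stores are below `R` or inside the block of `lengths`; `*f` is neither: `obj_stack`, `HandOK.objOut`). -/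
theorem bits_same {g : Ghost} {i : Nat} {A2 A3 Ai : Arena} {A : Arena × List Obj} {v : State} {mem' : Mem}
    (hcur : Cur g i A2 A3 Ai A v) (heq : Mem.EqOn g.f (g.f + 1808) v.mem mem') : Bits (g.Blk A) g.len mem' g.f := by
  have hobj : (objBlock g.f).Same v.mem mem' := heq
  exact hcur.sd.bits.frame_fields (Bits.SameFields.of_same hobj)

/-- **The blocks of the head-of-iteration snapshot `Ai` are apart from the `lengths` array** (dense: its block was allocated SINCE
`Ai`, `Since.ne_old` + `arena_disjoint`; sparse: a temp block, `blk_tblock_disjoint`). WHEN: the premise `hLa` of `cur_carry` /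
`kept_carry` for a window inside `[lengths, lengths + E)`. HOW: `C4.lengths_apart hcur.sd.arena hcur.ages.exti place B hB`. -/
theorem lengths_apart {Ai : Arena} {A : Arena × List Obj} {mem : Mem} {f c lengths : Nat} (ha : ArenaOK A.1 A.2 mem f)
    (hext : Ai.Extends A.1) (place : LengthsAt (Since Ai A.1) A mem c lengths) (B : Block) (hB : Ai.Blk B) :
    B.base + B.size ≤ lengths ∨ lengths + (Codebook.entries mem c).toNat ≤ B.base := by
  have hBA : A.1.Blk B := hB.mono hext
  rcases place.sparse_01 with h0 | h1
  · have hC := place.dense_block h0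
    have hne : B ≠ ⟨lengths, (Codebook.entries mem c).toNat⟩ := Since.ne_old hB hC
    exact arena_disjoint ha hBA hC.1 hne
  · have hT : A.1.TBlock lengths (Codebook.entries mem c).toNat := (place.sparse_temp h1).tblock (List.mem_singleton.mpr rfl)
    exact ha.blk_tblock_disjoint hBA hT

/-- **`InC4Next` AFTER THE BYTE STORE INTO `lengths[j]` AND `++j`** (the exits at `cut122` of C4b — `NO_CODE` — and of C4c — a
length): from `InC4Mid` at the segment's entry state `v`, the ONE `Agree` whose array window is the ONE byte `[lengths + j, lengths +
j + 1)`, `Bits` (`C4.bits_same`: no reader ran), the new byte (a legal length or 255), the walker's register facts. `hbp`: `total`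
is unchanged for `NO_CODE` (255), one more otherwise. WHEN: at `cut122` after the store. HOW: `hag` by `C4.Agree.of_sameExcept` from
`hsame : Mem.SameExcept [⟨rsp₀ − 1888, rsp₀ − 1480⟩, ⟨lengths + j, lengths + j + 1⟩] v.mem w.mem` (`u_same`); `hbyte` by reading the
stored byte back (`Vorbis.readLE_stored_byte32` / `u_read`); `h12` by `cnt32_succ`. -/
theorem next_of_store {u₀ : State} {g : Ghost} {pc : Word} {i : Nat} {A2 A3 Ai : Arena} {A : Arena × List Obj}
    {lengths E j : Nat} {v w : State} (hat : InC4Mid u₀ g i A2 A3 Ai A lengths E j pc v)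
    (hag : Agree g.R g.f (lengths + j) 1 v.mem w.mem) (hbits : Bits (g.Blk A) g.len w.mem g.f)
    (hrip : w.rip = pc_C4) (hrsp : w.reg .rsp = v.reg .rsp) (hinv : abiInv w)
    (h12 : w.reg .r12 = addr (j + 1)) (hbx : w.reg .rbx = addr lengths) (h14 : w.reg .r14 = v.reg .r14)
    (hbyte : (1 ≤ w.mem.u8 (lengths + j) ∧ w.mem.u8 (lengths + j) ≤ 31) ∨ w.mem.u8 (lengths + j) = 255)
    (hbp : (w.mem.u8 (lengths + j) = 255 ∧ w.reg .rbp = v.reg .rbp) ∨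
      (w.mem.u8 (lengths + j) ≠ 255 ∧ w.reg .rbp = addr (usedCount v.mem lengths j + 1))) :
    InC4Next u₀ g i A2 A3 Ai A lengths E j w := by
  have hfr := hat.frame
  have hcur := hat.cur
  have ha := hcur.sd.arena
  have hb := ha.bounds
  have hout := hcur.hand.objOut
  simp only [voff] at hout
  have hobr := hcur.sd.bits.OBR
  simp only [voff] at hobr
  have hglob := hcur.hand.outside ⟨0x120640, 16⟩ (by
    unfold fixedBlocks globalBlocks
    apply List.mem_cons_of_mem
    apply List.mem_cons_of_mem
    apply List.mem_cons_of_mem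
    apply List.mem_cons_of_mem
    exact List.mem_cons_self)
  simp only at hglob
  obtain ⟨hr1, hr2⟩ := hfr.r_eq
  obtain ⟨ha1, ha2, ha3⟩ := hfr.ra
  simp only [steady, depth] at hr1 ha2
  -- the `lengths` array, and the window `[lengths + j, lengths + j + 1)` inside it
  obtain ⟨w1, w2, w3, w4⟩ := lengths_where ha (fun B hB => hB.1) hat.place
  have hE : (Codebook.entries v.mem (g.cb v.mem i)).toNat = E := hat.ent
  have hjE := hat.j_lt
  rw [hE] at w2 w3 w4
  have hLs : lengths + j + 1 ≤ 0x700000 ∨ 0x800000 ≤ lengths + j := by omega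
  have hLt : lengths + j + 1 ≤ 0xC00000 := by omega
  have hLf : lengths + j + 1 ≤ g.f ∨ g.f + 1808 ≤ lengths + j := by omega
  have hLa : ∀ B, Ai.Blk B → B.base + B.size ≤ lengths + j ∨ lengths + j + 1 ≤ B.base := by
    intro B hB
    have hap := lengths_apart ha hcur.ages.exti hat.place B hB
    rw [hE] at hap
    omega
  have hLg : lengths + j + 1 ≤ Vorbis.Globals.log2_4.beg ∨ Vorbis.Globals.log2_4.beg + 16 ≤ lengths + j := by
    simp only [Vorbis.Globals.log2_4]
    omega
  have hfr' : Frame u₀ g pc_C4 A w :=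
    frame_carry hfr hcur.hand hobr ha hag hrip hrsp hinv hLs hLt hLf ⟨by omega, by omega⟩ hLg
  have hcur' : Cur g i A2 A3 Ai A w := cur_carry hfr hcur hag hbits h14 hLs hLt hLf hLa
  have ecb : g.cb w.mem i = g.cb v.mem i := cb_carry hfr hcur hag hLf
  have sf : Codebook.SameFields v.mem w.mem (g.cb v.mem i) := struct_same hcur (kept_carry hfr hcur hag hLa)
  obtain ⟨k1', fresh', place'⟩ := book_carry sf hat.k1 hat.fresh hat.place
  have eent : entriesOf g i w = entriesOf g i v := by
    unfold entriesOf
    rw [ecb, sf.entries]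
  -- the bytes below `j` are kept, the byte `j` is new
  have heq : Mem.EqOn lengths (lengths + j) v.mem w.mem := by
    apply hag.eqOn
    · omega
    · omega
    · omega
    · omega
    · omega
    · omega
    · omega
  obtain ⟨_, hu'⟩ := lengths_carry heq (by omega) hat.lenL
  have hlen : LenL w.mem lengths (j + 1) := hat.lenL.store heq (by omega) hbyte
  have hrbp : w.reg .rbp = addr (usedCount w.mem lengths (j + 1)) := by
    rcases hbp with ⟨h255, hr⟩ | ⟨hne, hr⟩
    · rw [usedCount_succ_unused h255, hu', hr]
      exact hat.rbp
    · rw [usedCount_succ_used hne, hu', hr]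
  have hjle : ((j + 1 : Nat) : Int) ≤ Codebook.entries w.mem (g.cb w.mem i) := by
    rw [ecb, sf.entries]
    omega
  refine ⟨?_, eent.trans hat.ent⟩
  exact
    { frame := hfr'
      cur := hcur'
      k1 := by rw [ecb]; exact k1'
      r12 := h12
      j_le := hjle
      rbp := hrbp
      rbx := hbx
      lenL := hlen
      place := by rw [ecb]; exact place'
      fresh := by rw [ecb]; exact fresh' }

end C4

/-! ### The claims of the four children -/

/-- Segment C4a: the head of a round (0x1147c3 – 0x1147f0, and 0x114792 – 0x11479c on the dense arm): the two checked loads of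
`c->entries` and `c->sparse`, the loop test, the sparse test, ONE `get_bits` call on either arm. Exits: `AtC5` (`j ≥ entries`), the
return of `get_bits(f, 1)` (sparse), the return of `get_bits(f, 5)` (dense). -/
def SegC4a (Lay : Layout) (μ : Microarch) (u₀ : State) : Prop :=
  ∀ (g : Ghost) (i : Nat) (A2 A3 Ai : Arena) (A : Arena × List Obj) (lengths j : Nat) (v : State),
    InC4 u₀ g i A2 A3 Ai A lengths j v →
      ReachVia Lay μ WayInv v (fun w => AtC5 u₀ g i w ∨
        InC4Mid u₀ g i A2 A3 Ai A lengths (C4.entriesOf g i v) j Vorbis.L.start_decoder.cut123 w ∨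
        InC4Mid u₀ g i A2 A3 Ai A lengths (C4.entriesOf g i v) j Vorbis.L.start_decoder.cut121 w)

/-- Segment C4b: from the return of `get_bits(f, 1)` (0x1147f5): `present ≠ 0`: the `get_bits(f, 5)` call (0x114792 – 0x11479c),
exit at its return; `present = 0`: `lengths[j] = NO_CODE` (checked byte store 0x114807), `++j`, exit at the head. -/
def SegC4b (Lay : Layout) (μ : Microarch) (u₀ : State) : Prop :=
  ∀ (g : Ghost) (i : Nat) (A2 A3 Ai : Arena) (A : Arena × List Obj) (lengths E j : Nat) (v : State),
    InC4Mid u₀ g i A2 A3 Ai A lengths E j Vorbis.L.start_decoder.cut123 v →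
      ReachVia Lay μ WayInv v (fun w => InC4Mid u₀ g i A2 A3 Ai A lengths E j Vorbis.L.start_decoder.cut121 w ∨
        InC4Next u₀ g i A2 A3 Ai A lengths E j w)

/-- Segment C4c: from the return of `get_bits(f, 5)` (0x1147a1): `lengths[j] = eax + 1` (checked byte store 0x1147b3), `++total`, the
`== 32` test; then `++j` and the head, or `call error` (0x11480e – 0x11481b), exit at its return. -/
def SegC4c (Lay : Layout) (μ : Microarch) (u₀ : State) : Prop :=
  ∀ (g : Ghost) (i : Nat) (A2 A3 Ai : Arena) (A : Arena × List Obj) (lengths E j : Nat) (v : State),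
    InC4Mid u₀ g i A2 A3 Ai A lengths E j Vorbis.L.start_decoder.cut121 v →
      ReachVia Lay μ WayInv v (fun w => InC4Next u₀ g i A2 A3 Ai A lengths E j w ∨ InC4Err u₀ g A w)

/-- Segment C4d: from the return of `error` (0x114820): `jmp 113b22`, the epilogue `AtERR` with eax = 0 and `Failed`. -/
def SegC4d (Lay : Layout) (μ : Microarch) (u₀ : State) : Prop :=
  ∀ (g : Ghost) (A : Arena × List Obj) (v : State), InC4Err u₀ g A v → ReachVia Lay μ WayInv v (fun w => AtERR u₀ g w)

/-! ### The composition -/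

/-- What `InC4Next` gives at the head: the loop invariant `AtC4` again, with a smaller measure. -/
theorem InC4Next.step {u₀ : State} {g : Ghost} {i : Nat} {A2 A3 Ai : Arena} {A : Arena × List Obj} {lengths j : Nat}
    {v w : State} (hv : InC4 u₀ g i A2 A3 Ai A lengths j v) (hj : j < C4.entriesOf g i v)
    (hw : InC4Next u₀ g i A2 A3 Ai A lengths (C4.entriesOf g i v) j w) :
    AtC4 u₀ g i w ∧ C4.measure g i w < C4.measure g i v := by
  obtain ⟨hw1, hw2⟩ := hw
  refine ⟨⟨A, lengths, j + 1, A2, A3, Ai, hw1⟩, ?_⟩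
  have hk := hw1.k1.ent_lt
  have hjl := hw1.j_le
  have e1 : (w.reg .r12).toNat = j + 1 := by
    rw [hw1.r12]
    exact toNat_addr _ (by omega)
  have e2 : (v.reg .r12).toNat = j := by
    rw [hv.r12]
    exact toNat_addr _ (by omega)
  unfold C4.measure
  rw [e1, e2, hw2]
  omega

/-- **THE COMPOSITION of the split of segment C4**: the four pieces (head → exit ∨ a `get_bits` return; `cut123` → `cut121` ∨ the
head; `cut121` → the head ∨ `cut124`; `cut124` → the epilogue) give the segment's claim by `ReachVia.loop` with the measure
`entries − j`. Pure logic: no machine step. -/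
theorem SegC4.of_parts {Lay : Layout} {μ : Microarch} {u₀ : State}
    (hH : SegC4a Lay μ u₀) (hM1 : SegC4b Lay μ u₀) (hM5 : SegC4c Lay μ u₀) (hME : SegC4d Lay μ u₀) : SegC4 Lay μ u₀ := by
  intro g i
  refine ReachVia.loop (C4.measure g i) ?_
  intro v hv
  obtain ⟨A, lengths, j, A2, A3, Ai, hin⟩ := hv
  refine (hH g i A2 A3 Ai A lengths j v hin).trans ?_
  intro w hw
  rcases hw with h5 | h123 | h121
  · exact ReachVia.done (Or.inl (Or.inl h5))
  · -- after `get_bits(f, 1)`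
    refine (hM1 g i A2 A3 Ai A lengths _ j w h123).trans ?_
    intro w' hw'
    rcases hw' with h121 | hn
    · refine (hM5 g i A2 A3 Ai A lengths _ j w' h121).trans ?_
      intro w'' hw''
      rcases hw'' with hn | herr
      · exact ReachVia.done (Or.inr (InC4Next.step hin h121.j_lt hn))
      · exact (hME g A w'' herr).mono (fun _ hx => Or.inl (Or.inr hx))
    · exact ReachVia.done (Or.inr (InC4Next.step hin h123.j_lt hn))
  · -- after `get_bits(f, 5)` on the dense path
    refine (hM5 g i A2 A3 Ai A lengths _ j w h121).trans ?_
    intro w'' hw''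
    rcases hw'' with hn | herr
    · exact ReachVia.done (Or.inr (InC4Next.step hin h121.j_lt hn))
    · exact (hME g A w'' herr).mono (fun _ hx => Or.inl (Or.inr hx))

end Vorbis.Spec.StartDecoder
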